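-- pv_equiv track=rewrite | github.com/asviswesh/protein_fitness_prediction | create_json_mutant.py | create_combo_string
-- ===== SOURCE A (Python) =====
-- WILD_TYPE_SEQUENCE = "VDGV"
--
-- def create_combo_string(sample_file):
--     specific_numbers = ['39', '40', '41', '54']
--     split_list = sample_file.split('_')
--     combo_string = ""
--     for number in specific_numbers:
--         found_num = False
--         for string in split_list:
--             if number in string:
--                 found_num = True
--                 combo_string += string[2]
--                 break
--         if not found_num:
--             replace_index = specific_numbers.index(number)
--             combo_string += WILD_TYPE_SEQUENCE[replace_index]
--     return combo_string
-- ===== SOURCE B (Python) =====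
-- WILD_TYPE_SEQUENCE = "VDGV"
--
-- def create_combo_string(sample_file):
--     specific_numbers = ['39', '40', '41', '54']
--     found = {}
--     for token in sample_file.split('_'):
--         for number in specific_numbers:
--             if number not in found and number in token:
--                 found[number] = token[2]
--     return ''.join(found.get(number, wild)
--                    for number, wild in zip(specific_numbers, WILD_TYPE_SEQUENCE))
-- ===== Notes on version B (the rewrite author's own statement) =====
-- stated objective: alternative
-- what changed: Inverted the loop nesting: instead of scanning the token list once per target number (numbers outer, tokens inner, with break and list.index for the wild-type fallback), B walks the tokens once building a first-match dict keyed by number, then assembles the result by zipping the numbers with the wild-type sequence and looking each up with dict.get.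
import Mathlib
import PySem

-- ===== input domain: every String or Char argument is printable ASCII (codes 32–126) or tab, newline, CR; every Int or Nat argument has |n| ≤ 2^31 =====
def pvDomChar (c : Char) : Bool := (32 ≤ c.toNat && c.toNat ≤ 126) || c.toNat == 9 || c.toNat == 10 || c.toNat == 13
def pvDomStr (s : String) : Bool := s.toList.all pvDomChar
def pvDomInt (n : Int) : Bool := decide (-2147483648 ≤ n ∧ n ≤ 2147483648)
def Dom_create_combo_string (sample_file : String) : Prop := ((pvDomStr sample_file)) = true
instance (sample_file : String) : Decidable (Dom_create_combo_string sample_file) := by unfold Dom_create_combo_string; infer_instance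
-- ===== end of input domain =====

-- B inverts A's loop nesting: one pass over the tokens builds a first-match dict keyed by
-- number, then the result is assembled by zipping the numbers with the wild-type sequence.

-- ===== PORT A =====
-- inner 'for string in split_list: if number in string: … break' loop of A
def pvScanA (split_list : List String) (number : String) : Option String :=
  match split_list with
  | [] => none
  | t :: rest => if PySem.Str.isIn number t then some t else pvScanA rest number

def create_combo_string (sample_file : String) : String :=
  let specific_numbers : List String := ["39", "40", "41", "54"]
  -- s.split('_'): "_" is non-empty so split? is always some; the [] default never fires
  let split_list := (PySem.Str.split? sample_file "_").getD []
  let combo := specific_numbers.foldl (fun (combo : List Char) number =>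
    combo ++
      (match pvScanA split_list number with
       | some s =>
          -- found_num: combo_string += string[2]  (none = IndexError, excluded by Pre_)
          (match PySem.Str.pyGet? s 2 with | some c => [c] | none => [])
       | none =>
          -- replace_index = specific_numbers.index(number); number is always in the list
          match PySem.List.index? specific_numbers number with
          | some i => (match PySem.Str.pyGet? "VDGV" (i : Int) with | some c => [c] | none => [])
          | none => [])) []
  String.ofList combo

-- ===== PORT B =====
-- body of B's inner 'for number in specific_numbers' loop (token fixed)
def pvStep (token : String) (d : PySem.Dict String Char) (number : String) : PySem.Dict String Char :=
  if !d.contains number && PySem.Str.isIn number token then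
    match PySem.Str.pyGet? token 2 with
    | some c => d.insert number c
    | none => d   -- IndexError in Python, excluded by Pre_
  else d

def create_combo_string_alt (sample_file : String) : String :=
  let specific_numbers : List String := ["39", "40", "41", "54"]
  let found := ((PySem.Str.split? sample_file "_").getD []).foldl
      (fun d token => specific_numbers.foldl (pvStep token) d) PySem.Dict.empty
  String.ofList ((specific_numbers.zip ("VDGV" : String).toList).map
      (fun p => ((found.get? p.1).getD p.2)))

-- ===== PRECONDITION & SPEC =====
-- Pre_ excludes exactly the inputs where Python raises IndexError: those where, for some of
-- the four numbers, the first '_'-token containing it has fewer than 3 characters.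
def Pre_create_combo_string (sample_file : String) : Prop :=
  ((["39", "40", "41", "54"] : List String).all (fun number =>
    match ((PySem.Str.split? sample_file "_").getD []).find? (fun t => PySem.Str.isIn number t) with
    | some t => decide (3 ≤ t.toList.length)
    | none => true)) = true
instance (sample_file : String) : Decidable (Pre_create_combo_string sample_file) := by
  unfold Pre_create_combo_string; infer_instance

def pvWitness_create_combo_string : String := "A39G_B40H_C41I_D54K"

def Spec_create_combo_string (sample_file : String) (out : String) : Prop := out = create_combo_string_alt sample_file
instance (sample_file : String) (out : String) : Decidable (Spec_create_combo_string sample_file out) := by unfold Spec_create_combo_string; infer_instance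

-- ===== CLAIM (what is proved, stated in full; the proofs are below) =====
def Claim_equal_create_combo_string : Prop := ∀ (sample_file : String), Dom_create_combo_string sample_file → Pre_create_combo_string sample_file → Spec_create_combo_string sample_file (create_combo_string sample_file)

-- ===== LEMMAS AND PROOFS =====

theorem pvScanA_eq_find? (l : List String) (n : String) :
    pvScanA l n = l.find? (fun t => PySem.Str.isIn n t) := by
  induction l with
  | nil => rfl
  | cons t rest ih =>
    simp only [pvScanA, ih, List.find?]
    cases PySem.Str.isIn n t <;> rfl

theorem pvPyGet2_isSome (s : String) (h : 3 ≤ s.toList.length) :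
    (PySem.Str.pyGet? s 2).isSome = true := by
  have h2 : (2 : Int) = ((2 : Nat) : Int) := rfl
  rw [h2, PySem.Str.pyGet?_natCast, List.getElem?_eq_getElem (by omega)]
  rfl

-- "effect at key n" of one pvStep, read off the old value at n
def pvEff (token n : String) (o : Option Char) : Option Char :=
  match o with
  | some v => some v
  | none =>
      if PySem.Str.isIn n token then
        (match PySem.Str.pyGet? token 2 with | some c => some c | none => none)
      else none

theorem pvStepGet (token : String) (d : PySem.Dict String Char) (number n : String) :
    (pvStep token d number).get? n =
      if n = number then pvEff token n (d.get? n) else d.get? n := by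
  unfold pvStep
  by_cases hnn : n = number
  · subst hnn
    rw [if_pos rfl]
    cases hc : d.contains n with
    | true =>
      have hv := hc
      rw [PySem.Dict.contains_eq_isSome_get?] at hv
      obtain ⟨v, hv⟩ := Option.isSome_iff_exists.mp hv
      simp only [hc, Bool.not_true, Bool.false_and, Bool.false_eq_true, if_false, hv, pvEff]
    | false =>
      have hg : d.get? n = none := by
        cases h : d.get? n with
        | none => rfl
        | some v => rw [PySem.Dict.contains_eq_isSome_get?, h] at hc; simp at hc
      cases hin : PySem.Str.isIn n token with
      | false =>
        simp only [hc, hin, Bool.not_false, Bool.true_and, Bool.false_eq_true, if_false,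
          hg, pvEff]
      | true =>
        cases hget : PySem.Str.pyGet? token 2 with
        | some c =>
          simp only [hc, hin, Bool.not_false, Bool.true_and, if_true, hget, hg, pvEff,
            PySem.Dict.get?_insert_self]
        | none =>
          simp only [hc, hin, Bool.not_false, Bool.true_and, if_true, hget, hg, pvEff]
  · rw [if_neg hnn]
    split
    · split
      · exact PySem.Dict.get?_insert_of_ne d _ hnn
      · rfl
    · rfl

theorem pvFold4Get (token : String) (d : PySem.Dict String Char) (n : String)
    (hn : n ∈ (["39", "40", "41", "54"] : List String)) :
    ((["39", "40", "41", "54"] : List String).foldl (pvStep token) d).get? n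
      = pvEff token n (d.get? n) := by
  simp only [List.mem_cons, List.not_mem_nil, or_false] at hn
  rcases hn with rfl | rfl | rfl | rfl <;>
    simp [List.foldl_cons, List.foldl_nil, pvStepGet]

theorem pvBuildGet (tokens : List String) (n : String)
    (hn : n ∈ (["39", "40", "41", "54"] : List String)) :
    ∀ d : PySem.Dict String Char,
      ((d.get? n).isSome = true ∨
        ∀ t, tokens.find? (fun t => PySem.Str.isIn n t) = some t → (PySem.Str.pyGet? t 2).isSome = true) →
      (tokens.foldl (fun d token => (["39", "40", "41", "54"] : List String).foldl (pvStep token) d) d).get? n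
        = Option.or (d.get? n) ((tokens.find? (fun t => PySem.Str.isIn n t)).bind (fun t => PySem.Str.pyGet? t 2)) := by
  induction tokens with
  | nil => intro d _; simp
  | cons t rest ih =>
    intro d pre
    rw [List.foldl_cons]
    have hstep : ((["39", "40", "41", "54"] : List String).foldl (pvStep t) d).get? n
        = pvEff t n (d.get? n) := pvFold4Get t d n hn
    cases hd : d.get? n with
    | some v =>
      have h1 : ((["39", "40", "41", "54"] : List String).foldl (pvStep t) d).get? n = some v := by
        rw [hstep, hd]; simp only [pvEff]
      rw [ih _ (Or.inl (by rw [h1]; rfl)), h1]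
      simp only [Option.some_or]
    | none =>
      rcases pre with hpre | hpre
      · rw [hd] at hpre; simp at hpre
      cases hin : PySem.Str.isIn n t with
      | true =>
        have hf : (t :: rest).find? (fun t => PySem.Str.isIn n t) = some t := by
          simp only [List.find?_cons, hin, cond_true]
        obtain ⟨c, hc⟩ := Option.isSome_iff_exists.mp (hpre t hf)
        have hc' : PySem.List.pyGet? t.toList 2 = some c := by simpa using hc
        have h1 : ((["39", "40", "41", "54"] : List String).foldl (pvStep t) d).get? n = some c := by
          rw [hstep, hd]
          simp only [pvEff, hin, if_true, hc]
        rw [ih _ (Or.inl (by rw [h1]; rfl)), h1, hf]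
        simp [hc']
      | false =>
        have hf : (t :: rest).find? (fun t => PySem.Str.isIn n t)
            = rest.find? (fun t => PySem.Str.isIn n t) := by
          simp only [List.find?_cons, hin, cond_false]
        have h1 : ((["39", "40", "41", "54"] : List String).foldl (pvStep t) d).get? n = none := by
          rw [hstep, hd]
          simp only [pvEff, hin, Bool.false_eq_true, if_false]
        rw [ih _ (Or.inr (fun t' ht' => hpre t' (by rw [hf]; exact ht'))), h1, hf]

theorem pvChunkEq (split : List String) (n : String) (wt : Char) (wild : List Char)
    (hwild : wild = [wt])
    (hpre : ∀ t, split.find? (fun t => PySem.Str.isIn n t) = some t → (PySem.Str.pyGet? t 2).isSome = true) :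
    (match pvScanA split n with
      | some s => (match PySem.Str.pyGet? s 2 with | some c => [c] | none => ([] : List Char))
      | none => wild)
    = [(Option.or (none : Option Char)
        ((split.find? (fun t => PySem.Str.isIn n t)).bind (fun t => PySem.Str.pyGet? t 2))).getD wt] := by
  rw [pvScanA_eq_find?]
  cases hf : split.find? (fun t => PySem.Str.isIn n t) with
  | none => simp [hwild]
  | some t =>
    obtain ⟨c, hc⟩ := Option.isSome_iff_exists.mp (hpre t hf)
    have hc' : PySem.List.pyGet? t.toList 2 = some c := by simpa using hc
    simp [hc, hc']

-- ===== VERDICT (by name: the statement is the Claim_ definition above) =====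
theorem create_combo_string_spec : Claim_equal_create_combo_string := by
  unfold Claim_equal_create_combo_string
  intro s _ hpre
  unfold Spec_create_combo_string
  unfold Pre_create_combo_string at hpre
  simp only [create_combo_string, create_combo_string_alt]
  set sp := (PySem.Str.split? s "_").getD [] with hsp
  have hpre' : ∀ n ∈ (["39", "40", "41", "54"] : List String), ∀ t,
      sp.find? (fun t => PySem.Str.isIn n t) = some t → (PySem.Str.pyGet? t 2).isSome = true := by
    intro n hn t ht
    have h := List.all_eq_true.mp hpre n hn
    rw [ht] at h
    exact pvPyGet2_isSome t (of_decide_eq_true h)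
  have hb : ∀ n ∈ (["39", "40", "41", "54"] : List String),
      ((sp.foldl (fun d token => (["39", "40", "41", "54"] : List String).foldl (pvStep token) d)
          PySem.Dict.empty).get? n)
        = Option.or (none : Option Char)
            ((sp.find? (fun t => PySem.Str.isIn n t)).bind (fun t => PySem.Str.pyGet? t 2)) := by
    intro n hn
    rw [pvBuildGet sp n hn PySem.Dict.empty (Or.inr (hpre' n hn))]
    simp [PySem.Dict.get?_empty]
  have e39 := pvChunkEq sp "39" 'V'
    (match PySem.List.index? (["39", "40", "41", "54"] : List String) "39" with
     | some i => (match PySem.Str.pyGet? "VDGV" (i : Int) with | some c => [c] | none => [])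
     | none => []) (by decide) (hpre' "39" (by simp))
  have e40 := pvChunkEq sp "40" 'D'
    (match PySem.List.index? (["39", "40", "41", "54"] : List String) "40" with
     | some i => (match PySem.Str.pyGet? "VDGV" (i : Int) with | some c => [c] | none => [])
     | none => []) (by decide) (hpre' "40" (by simp))
  have e41 := pvChunkEq sp "41" 'G'
    (match PySem.List.index? (["39", "40", "41", "54"] : List String) "41" with
     | some i => (match PySem.Str.pyGet? "VDGV" (i : Int) with | some c => [c] | none => [])
     | none => []) (by decide) (hpre' "41" (by simp))
  have e54 := pvChunkEq sp "54" 'V'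
    (match PySem.List.index? (["39", "40", "41", "54"] : List String) "54" with
     | some i => (match PySem.Str.pyGet? "VDGV" (i : Int) with | some c => [c] | none => [])
     | none => []) (by decide) (hpre' "54" (by simp))
  have hV : ("VDGV" : String).toList = ['V', 'D', 'G', 'V'] := by decide
  rw [PySem.List.foldl_append_eq_flatMap]
  simp only [hV, List.zip_cons_cons, List.zip_nil_right, List.map_cons, List.map_nil,
    List.flatMap_cons, List.flatMap_nil, List.nil_append, List.append_nil]
  rw [hb "39" (by simp), hb "40" (by simp), hb "41" (by simp), hb "54" (by simp)]
  rw [e39, e40, e41, e54]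
  simp
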